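-- pv_equiv track=rewrite | github.com/Umang9959/DarkPatternsDetector | GetText_Working.py | Dark_Score
-- ===== SOURCE A (Python) =====
-- def Dark_Score(n):
--     score=100
--     for pattern in n:
--         if pattern=='Scarcity' or pattern=='Urgency' or pattern=='Misdirection':
--             score-=5
--         elif pattern=='Obstruction'or pattern=='Sneaking':
--             score-=15
--         else:
--             score-=20
--     return(score)
-- ===== SOURCE B (Python) =====
-- def Dark_Score(n):
--     light = sum(1 for p in n if p in ('Scarcity', 'Urgency', 'Misdirection'))
--     mid = sum(1 for p in n if p in ('Obstruction', 'Sneaking'))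
--     return 100 - 5 * light - 15 * mid - 20 * (len(n) - light - mid)
-- ===== Notes on version B (the rewrite author's own statement) =====
-- stated objective: simpler
-- what changed: Replaces the per-element score-decrementing loop by two countIf tallies and a closed-form arithmetic expression deriving the 'else' bucket by subtraction from the total length.
import Mathlib
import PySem

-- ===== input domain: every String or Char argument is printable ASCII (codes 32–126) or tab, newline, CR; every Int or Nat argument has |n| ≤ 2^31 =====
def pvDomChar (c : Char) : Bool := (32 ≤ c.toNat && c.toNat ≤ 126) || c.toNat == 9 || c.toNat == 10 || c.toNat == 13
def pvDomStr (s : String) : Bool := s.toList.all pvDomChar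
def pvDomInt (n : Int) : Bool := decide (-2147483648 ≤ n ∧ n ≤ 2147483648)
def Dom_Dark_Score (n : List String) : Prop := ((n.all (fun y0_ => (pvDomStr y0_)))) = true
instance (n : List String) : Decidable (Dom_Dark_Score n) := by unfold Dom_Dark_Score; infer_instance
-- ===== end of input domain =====

-- ===== PORT A =====
-- A: loop over patterns, subtracting 5/15/20 from a running score.
def Dark_Score (n : List String) : Int :=
  n.foldl (fun score pattern =>
    if pattern = "Scarcity" || pattern = "Urgency" || pattern = "Misdirection" then
      score - 5
    else if pattern = "Obstruction" || pattern = "Sneaking" then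
      score - 15
    else
      score - 20) 100

-- ===== PORT B =====
-- B: two tallies plus closed-form arithmetic (simpler decomposition; same cost).
def Dark_Score_alt (n : List String) : Int :=
  let light : Int := n.countP (fun p => p = "Scarcity" || p = "Urgency" || p = "Misdirection")
  let mid : Int := n.countP (fun p => p = "Obstruction" || p = "Sneaking")
  100 - 5 * light - 15 * mid - 20 * ((n.length : Int) - light - mid)

-- ===== PRECONDITION & SPEC =====
def Spec_Dark_Score (n : List String) (out : Int) : Prop := out = Dark_Score_alt n
instance (n : List String) (out : Int) : Decidable (Spec_Dark_Score n out) := by unfold Spec_Dark_Score; infer_instance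

-- ===== CLAIM (what is proved, stated in full; the proofs are below) =====
def Claim_equal_Dark_Score : Prop := ∀ (n : List String), Dom_Dark_Score n → Spec_Dark_Score n (Dark_Score n)

-- ===== LEMMAS AND PROOFS =====

-- ===== VERDICT (by name: the statement is the Claim_ definition above) =====
theorem foldl_score (n : List String) (s : Int) :
    n.foldl (fun score pattern =>
      if pattern = "Scarcity" || pattern = "Urgency" || pattern = "Misdirection" then
        score - 5
      else if pattern = "Obstruction" || pattern = "Sneaking" then
        score - 15
      else
        score - 20) s
    = s - 5 * (n.countP (fun p => p = "Scarcity" || p = "Urgency" || p = "Misdirection") : Int)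
        - 15 * (n.countP (fun p => p = "Obstruction" || p = "Sneaking") : Int)
        - 20 * ((n.length : Int)
            - (n.countP (fun p => p = "Scarcity" || p = "Urgency" || p = "Misdirection") : Int)
            - (n.countP (fun p => p = "Obstruction" || p = "Sneaking") : Int)) := by
  induction n generalizing s with
  | nil => simp
  | cons h t ih =>
    simp only [List.foldl_cons, List.countP_cons, List.length_cons, ih]
    by_cases h1 : (h = "Scarcity" || h = "Urgency" || h = "Misdirection") = true
    · simp only [Bool.or_eq_true, decide_eq_true_eq] at h1
      rcases h1 with (h1 | h1) | h1 <;> subst h1 <;> simp <;> push_cast <;> ring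
    · by_cases h2 : (h = "Obstruction" || h = "Sneaking") = true <;>
        simp [h1, h2] <;> push_cast <;> ring

theorem Dark_Score_spec : Claim_equal_Dark_Score := by
  intro n _
  unfold Spec_Dark_Score Dark_Score Dark_Score_alt
  rw [foldl_score]
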